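-- pv_equiv track=rewrite | github.com/gaoliuyi/meow | yhf班24春/27205护林员盖房子加强版.py | maxs
-- ===== SOURCE A (Python) =====
-- def maxs(a):
--     rows=len(a)
--     cols=len(a[0])
--     h=[0 for i in range(cols+1)]
--     ans=0
--
--     for i in range(rows):
--         stack=[-1]
--         for j in range(cols+1):
--             if j==cols or a[i][j]==1:
--                 x=0
--             else:
--                 x=h[j]+1
--             h[j]=x
--             while len(stack)>1 and h[stack[-1]]>x:
--                 ans=max(ans,h[stack[-1]]*(j-stack[-2]-1))
--
--                 stack.pop()
--             stack.append(j)
--     return ans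
-- ===== SOURCE B (Python) =====
-- def maxs(a):
--     rows = len(a)
--     cols = len(a[0])
--     h = [0] * (cols + 1)
--     ans = 0
--     for i in range(rows):
--         row = a[i]
--         h = [0 if j == cols or row[j] == 1 else h[j] + 1 for j in range(cols + 1)]
--         for t in range(cols):
--             ht = h[t]
--             if ht > 0:
--                 p = t - 1
--                 while p >= 0 and h[p] > ht:
--                     p -= 1
--                 q = t + 1
--                 while h[q] >= ht:
--                     q += 1
--                 area = ht * (q - p - 1)
--                 if area > ans:
--                     ans = area
--     return ans
-- ===== Notes on version B (the rewrite author's own statement) =====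
-- stated objective: alternative
-- what changed: Replaced the per-row monotonic-stack largest-rectangle-in-histogram pass with a stackless per-bar computation: the row's height array is rebuilt as a comprehension and each positive bar is widened by two direct scans (left while strictly taller, right while at least as tall), taking the max area.
import Mathlib
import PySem

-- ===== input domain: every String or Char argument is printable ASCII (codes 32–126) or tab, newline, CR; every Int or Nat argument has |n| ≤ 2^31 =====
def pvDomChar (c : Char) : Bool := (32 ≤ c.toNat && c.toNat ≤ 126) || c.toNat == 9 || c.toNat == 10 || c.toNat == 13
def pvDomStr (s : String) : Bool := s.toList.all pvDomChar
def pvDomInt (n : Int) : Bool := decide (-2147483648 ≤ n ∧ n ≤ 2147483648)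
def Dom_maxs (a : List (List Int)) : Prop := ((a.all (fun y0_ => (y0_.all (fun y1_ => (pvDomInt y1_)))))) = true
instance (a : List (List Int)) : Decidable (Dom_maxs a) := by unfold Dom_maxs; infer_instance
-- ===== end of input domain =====

-- B replaces the per-row monotonic-stack histogram pass with a stackless per-bar
-- computation (two direct widening scans per positive bar); alternative algorithm, not faster.

-- ===== PORT A =====
-- while len(stack)>1 and h[stack[-1]]>x: ans=max(ans,h[stack[-1]]*(j-stack[-2]-1)); stack.pop()
-- (the Python stack grows at the right end; here the list head is the stack top,
--  so stack[-1] is the first element and stack[-2] the second; indices are always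
--  in range under Pre_, so h[...] is read with pyGetD)
def popA (h : List Int) (x j : Int) : List Int → Int → List Int × Int
  | s0 :: s1 :: rest, ans =>
      if PySem.List.pyGetD h s0 0 > x then
        popA h x j (s1 :: rest) (max ans (PySem.List.pyGetD h s0 0 * (j - s1 - 1)))
      else (s0 :: s1 :: rest, ans)
  | s, ans => (s, ans)

-- body of 'for j in range(cols+1)': state (h, stack, ans)
def stepA (row : List Int) (cols : Int) : List Int × List Int × Int → Int → List Int × List Int × Int
  | (h, stack, ans), j =>
    let x : Int := if j == cols || PySem.List.pyGetD row j 0 == 1 then 0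
                   else PySem.List.pyGetD h j 0 + 1
    let h' := PySem.List.pySetD h j x
    let r := popA h' x j stack ans
    (h', j :: r.1, r.2)

def maxs (a : List (List Int)) : Int :=
  let rows : Int := a.length
  let cols : Int := (PySem.List.pyGetD a 0 []).length
  let h0 : List Int := (PySem.List.pyRange 0 (cols + 1) 1).map (fun _ => 0)
  let fin := (PySem.List.pyRange 0 rows 1).foldl
    (fun (st : List Int × Int) i =>
      let row := PySem.List.pyGetD a i []
      let r := (PySem.List.pyRange 0 (cols + 1) 1).foldl (stepA row cols) (st.1, [-1], st.2)
      (r.1, r.2.2)) (h0, 0)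
  fin.2

-- ===== PORT B =====
-- h = [0 if j == cols or row[j] == 1 else h[j] + 1 for j in range(cols + 1)]
def heightsB (row : List Int) (cols : Int) (h : List Int) : List Int :=
  (PySem.List.pyRange 0 (cols + 1) 1).map (fun j =>
    if j == cols || PySem.List.pyGetD row j 0 == 1 then 0
    else PySem.List.pyGetD h j 0 + 1)

-- while p >= 0 and h[p] > ht: p -= 1
def scanL (h : List Int) (ht : Int) (p : Int) : Int :=
  if hc : 0 ≤ p ∧ PySem.List.pyGetD h p 0 > ht then scanL h ht (p - 1) else p
termination_by (p + 1).toNat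
decreasing_by omega

-- while h[q] >= ht: q += 1   (the '0 ≤ q ∧ q < len' bounds only make the recursion
-- total: in Source B the scan starts at q ≥ 1 and, being run only for ht > 0, stops at
-- h[cols] = 0 before leaving the list, so the guard never changes the result)
def scanR (h : List Int) (ht : Int) (q : Int) : Int :=
  if hc : 0 ≤ q ∧ q < (h.length : Int) ∧ PySem.List.pyGetD h q 0 ≥ ht then scanR h ht (q + 1) else q
termination_by ((h.length : Int) - q).toNat
decreasing_by omega

def maxs_alt (a : List (List Int)) : Int :=
  let rows : Int := a.length
  let cols : Int := (PySem.List.pyGetD a 0 []).length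
  let fin := (PySem.List.pyRange 0 rows 1).foldl
    (fun (st : List Int × Int) i =>
      let row := PySem.List.pyGetD a i []
      let h := heightsB row cols st.1
      let ans := (PySem.List.pyRange 0 cols 1).foldl (fun ans t =>
        let ht := PySem.List.pyGetD h t 0
        if ht > 0 then
          let p := scanL h ht (t - 1)
          let q := scanR h ht (t + 1)
          let area := ht * (q - p - 1)
          if area > ans then area else ans
        else ans) st.2
      (h, ans)) (List.replicate (cols + 1).toNat 0, 0)
  fin.2

-- ===== PRECONDITION & SPEC =====
-- Pre_ excludes exactly the inputs where Python A raises IndexError: the empty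
-- matrix (a[0]) and ragged matrices with a row shorter than row 0 (a[i][j]).
def Pre_maxs (a : List (List Int)) : Prop :=
  a ≠ [] ∧ ∀ row ∈ a, (a.headD []).length ≤ row.length
instance (a : List (List Int)) : Decidable (Pre_maxs a) := by unfold Pre_maxs; infer_instance
def pvWitness_maxs : List (List Int) := [[0, 1], [0, 0]]

def Spec_maxs (a : List (List Int)) (out : Int) : Prop := out = maxs_alt a
instance (a : List (List Int)) (out : Int) : Decidable (Spec_maxs a out) := by unfold Spec_maxs; infer_instance

-- ===== CLAIM (what is proved, stated in full; the proofs are below) =====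
def Claim_equal_maxs : Prop := ∀ (a : List (List Int)), Dom_maxs a → Pre_maxs a → Spec_maxs a (maxs a)

-- ===== LEMMAS AND PROOFS =====

-- ---- the abstract per-row model: a monotonic stack of Nat indices over heights g ----
def mbelow : List Nat → Int
  | [] => -1
  | t :: _ => (t : Int)

def mpop (g : Nat → Int) (x : Int) (j : Nat) : List Nat → Int → List Nat × Int
  | [], ans => ([], ans)
  | t :: rest, ans =>
      if x < g t then mpop g x j rest (max ans (g t * ((j : Int) - mbelow rest - 1)))
      else (t :: rest, ans)

def mstep (g : Nat → Int) (st : List Nat × Int) (j : Nat) : List Nat × Int :=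
  let r := mpop g (g j) j st.1 st.2
  (j :: r.1, r.2)

def mrun (g : Nat → Int) (ans0 : Int) (k : Nat) : List Nat × Int :=
  (List.range k).foldl (mstep g) ([], ans0)

def Keep (g : Nat → Int) (k t : Nat) : Prop := t < k ∧ ∀ u, t < u → u < k → g t ≤ g u
def Popped (g : Nat → Int) (k t : Nat) : Prop := ∃ u, t < u ∧ u < k ∧ g u < g t

def nleA (g : Nat → Int) (ht : Int) : Nat → Int
  | 0 => -1
  | p + 1 => if g p ≤ ht then (p : Int) else nleA g ht p

def nsrA (g : Nat → Int) (ht : Int) : Nat → Nat → Nat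
  | q, 0 => q
  | q, f + 1 => if g q < ht then q else nsrA g ht (q + 1) f

def marea (g : Nat → Int) (n t : Nat) : Int :=
  g t * (((nsrA g (g t) (t + 1) (n - t) : Nat) : Int) - nleA g (g t) t - 1)

def SInv (g : Nat → Int) (k : Nat) (s : List Nat) : Prop :=
  s.Pairwise (· > ·) ∧ ∀ t, t ∈ s ↔ Keep g k t

def AInv (g : Nat → Int) (n : Nat) (ans0 : Int) (k : Nat) (ans : Int) : Prop :=
  ans0 ≤ ans ∧ (∀ t, Popped g k t → marea g n t ≤ ans) ∧
    (ans = ans0 ∨ ∃ t, Popped g k t ∧ ans = marea g n t)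

-- ---- nle/nsr specifications and uniqueness ----
lemma nleA_lt (g : Nat → Int) (ht : Int) (t : Nat) : -1 ≤ nleA g ht t ∧ nleA g ht t < (t : Int) := by
  induction t with
  | zero => simp [nleA]
  | succ p ih =>
    simp only [nleA]
    split
    · constructor <;> push_cast <;> omega
    · obtain ⟨h1, h2⟩ := ih
      refine ⟨h1, ?_⟩
      push_cast
      omega

lemma nleA_val (g : Nat → Int) (ht : Int) (t : Nat) :
    nleA g ht t = -1 ∨ (0 ≤ nleA g ht t ∧ g (nleA g ht t).toNat ≤ ht) := by
  induction t with
  | zero => left; simp [nleA]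
  | succ p ih =>
    simp only [nleA]
    split
    · rename_i hle
      right
      refine ⟨by positivity, ?_⟩
      simpa using hle
    · exact ih

lemma nleA_gt (g : Nat → Int) (ht : Int) (t : Nat) :
    ∀ p : Nat, nleA g ht t < (p : Int) → p < t → ht < g p := by
  induction t with
  | zero => intro p h1 h2; omega
  | succ p ih =>
    simp only [nleA]
    split
    · rename_i hle
      intro q h1 h2
      have : p < q := by exact_mod_cast h1
      omega
    · rename_i hgt
      intro q h1 h2
      rcases Nat.lt_succ_iff_lt_or_eq.mp h2 with hq | hq
      · exact ih q h1 hq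
      · subst hq; omega

lemma nle_unique (g : Nat → Int) (ht : Int) (t : Nat) (b : Int)
    (h1 : -1 ≤ b) (h2 : b < (t : Int))
    (h3 : b = -1 ∨ (0 ≤ b ∧ g b.toNat ≤ ht))
    (h4 : ∀ p : Nat, b < (p : Int) → p < t → ht < g p) : b = nleA g ht t := by
  rcases lt_trichotomy b (nleA g ht t) with hlt | heq | hgt
  · exfalso
    rcases nleA_val g ht t with hv | ⟨hv0, hv⟩
    · omega
    · have h2' := (nleA_lt g ht t).2
      have hp1 : b < ((nleA g ht t).toNat : Int) := by omega
      have hp2 : (nleA g ht t).toNat < t := by omega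
      exact absurd hv (not_le.mpr (h4 _ hp1 hp2))
  · exact heq
  · exfalso
    have h1' := (nleA_lt g ht t).1
    rcases h3 with hv | ⟨hv0, hv⟩
    · omega
    · have hp1 : nleA g ht t < (b.toNat : Int) := by omega
      have hp2 : b.toNat < t := by omega
      exact absurd hv (not_le.mpr (nleA_gt g ht t _ hp1 hp2))

lemma nsrA_spec (g : Nat → Int) (ht : Int) :
    ∀ (f q : Nat), (∃ d, d < f ∧ g (q + d) < ht) →
      q ≤ nsrA g ht q f ∧ g (nsrA g ht q f) < ht ∧ ∀ u, q ≤ u → u < nsrA g ht q f → ht ≤ g u := by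
  intro f
  induction f with
  | zero => intro q h; obtain ⟨d, hd, _⟩ := h; omega
  | succ f ih =>
    intro q hex
    simp only [nsrA]
    split
    · rename_i hq
      exact ⟨le_refl _, hq, fun u h1 h2 => absurd h1 (by omega)⟩
    · rename_i hq
      obtain ⟨d, hd, hgd⟩ := hex
      have hd0 : d ≠ 0 := by rintro rfl; exact hq (by simpa using hgd)
      have hex' : ∃ d', d' < f ∧ g (q + 1 + d') < ht :=
        ⟨d - 1, by omega, by rw [show q + 1 + (d - 1) = q + d by omega]; exact hgd⟩
      obtain ⟨i1, i2, i3⟩ := ih (q + 1) hex'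
      refine ⟨by omega, i2, ?_⟩
      intro u h1 h2
      rcases Nat.eq_or_lt_of_le h1 with rfl | hu
      · omega
      · exact i3 u (by omega) h2

lemma nsr_unique (g : Nat → Int) (ht : Int) (q f r : Nat)
    (hex : ∃ d, d < f ∧ g (q + d) < ht)
    (h1 : q ≤ r) (h2 : g r < ht) (h3 : ∀ u, q ≤ u → u < r → ht ≤ g u) : r = nsrA g ht q f := by
  obtain ⟨i1, i2, i3⟩ := nsrA_spec g ht f q hex
  rcases lt_trichotomy r (nsrA g ht q f) with hlt | heq | hgt
  · exact absurd h2 (not_lt.mpr (i3 r h1 hlt))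
  · exact heq
  · exact absurd i2 (not_lt.mpr (h3 _ i1 hgt))

-- ---- no index strictly between two adjacent stack entries can satisfy Keep ----
lemma exists_keep_between (g : Nat → Int) (j t : Nat) (hk : Keep g j t) (b : Int)
    (hbt : b < (t : Int)) (p : Nat) (hp1 : b < (p : Int)) (hp2 : p < t) (hp3 : g p ≤ g t) :
    ∃ q : Nat, b < (q : Int) ∧ q < t ∧ Keep g j q := by
  classical
  obtain ⟨hkj, hkmin⟩ := hk
  have hPp : (fun r : Nat => b < (r : Int) ∧ r < t ∧ g r ≤ g t) p := ⟨hp1, hp2, hp3⟩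
  have hspec := Nat.findGreatest_spec (P := fun r : Nat => b < (r : Int) ∧ r < t ∧ g r ≤ g t) hp2.le hPp
  set q := Nat.findGreatest (fun r : Nat => b < (r : Int) ∧ r < t ∧ g r ≤ g t) t with hqdef
  obtain ⟨hq1, hq2, hq3⟩ := hspec
  refine ⟨q, hq1, hq2, ⟨by omega, ?_⟩⟩
  intro u hu1 hu2
  rcases lt_trichotomy u t with hut | hut
  · by_contra hgu
    push_neg at hgu
    have hPu : (fun r : Nat => b < (r : Int) ∧ r < t ∧ g r ≤ g t) u :=
      ⟨by push_cast; omega, hut, le_trans hgu.le hq3⟩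
    exact Nat.findGreatest_is_greatest (P := fun r : Nat => b < (r : Int) ∧ r < t ∧ g r ≤ g t) hu1 hut.le hPu
  · rcases hut with rfl | hut
    · exact hq3
    · exact le_trans hq3 (hkmin u hut hu2)

lemma gap_gt (g : Nat → Int) (j : Nat) (s0 : List Nat) (hp : s0.Pairwise (· > ·))
    (hmem : ∀ t, t ∈ s0 ↔ Keep g j t) (t : Nat) (rest : List Nat)
    (hsuf : (t :: rest) <:+ s0) :
    ∀ p : Nat, mbelow rest < (p : Int) → p < t → g t < g p := by
  intro p hbp hpt
  by_contra hle
  push_neg at hle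
  have hts0 : t ∈ s0 := hsuf.subset (by simp)
  have hkt : Keep g j t := (hmem t).mp hts0
  have hpair : (t :: rest).Pairwise (· > ·) := hp.sublist hsuf.sublist
  have hbt : mbelow rest < (t : Int) := by
    cases rest with
    | nil => simp only [mbelow]; omega
    | cons t' r2 =>
      have : t > t' := (List.pairwise_cons.mp hpair).1 t' (by simp)
      simp only [mbelow]
      exact_mod_cast this
  obtain ⟨q, hq1, hq2, hq3⟩ := exists_keep_between g j t hkt (mbelow rest) hbt p hbp hpt hle
  have hqs0 : q ∈ s0 := (hmem q).mpr hq3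
  obtain ⟨pre, hpre⟩ := hsuf
  rw [← hpre] at hqs0 hp
  rcases List.mem_append.mp hqs0 with hq | hq
  · have := (List.pairwise_append.mp hp).2.2 q hq t (by simp)
    omega
  · rcases List.mem_cons.mp hq with rfl | hq
    · omega
    · cases rest with
      | nil => simp at hq
      | cons t' r2 =>
        rcases List.mem_cons.mp hq with rfl | hq
        · simp [mbelow] at hq1
        · have hpair2 : (t' :: r2).Pairwise (· > ·) := (List.pairwise_cons.mp hpair).2
          have : t' > q := (List.pairwise_cons.mp hpair2).1 q hq
          simp only [mbelow] at hq1
          omega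

-- ---- the pop loop preserves the invariants and records exact areas ----
lemma mpop_inv (g : Nat → Int) (n j : Nat) (ans0 : Int) (hg : ∀ t, 0 ≤ g t) (hjn : j ≤ n)
    (s0 : List Nat) (hp : s0.Pairwise (· > ·)) (hmem : ∀ t, t ∈ s0 ↔ Keep g j t) :
    ∀ (s : List Nat) (ans : Int), s <:+ s0 → ans0 ≤ ans →
      (∀ t, (Popped g j t ∨ (t ∈ s0 ∧ t ∉ s ∧ g j < g t)) → marea g n t ≤ ans) →
      (ans = ans0 ∨ ∃ t, (Popped g j t ∨ (t ∈ s0 ∧ g j < g t)) ∧ ans = marea g n t) →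
      (mpop g (g j) j s ans).1 <:+ s ∧
      (∀ t, t ∈ (mpop g (g j) j s ans).1 ↔ (t ∈ s ∧ g t ≤ g j)) ∧
      ans0 ≤ (mpop g (g j) j s ans).2 ∧
      (∀ t, (Popped g j t ∨ (t ∈ s0 ∧ t ∉ (mpop g (g j) j s ans).1 ∧ g j < g t)) →
          marea g n t ≤ (mpop g (g j) j s ans).2) ∧
      ((mpop g (g j) j s ans).2 = ans0 ∨
        ∃ t, (Popped g j t ∨ (t ∈ s0 ∧ g j < g t)) ∧ (mpop g (g j) j s ans).2 = marea g n t) := by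
  intro s
  induction s with
  | nil =>
    intro ans _ h1 h2 h3
    simp only [mpop]
    exact ⟨List.suffix_rfl, by simp, h1, fun t ht => h2 t (by simpa using ht), h3⟩
  | cons t rest ih =>
    intro ans hsuf h1 h2 h3
    have hts0 : t ∈ s0 := hsuf.subset (by simp)
    obtain ⟨hktj, hktmin⟩ := (hmem t).mp hts0
    have hpair : (t :: rest).Pairwise (· > ·) := hp.sublist hsuf.sublist
    have hrest : rest <:+ s0 := (List.suffix_cons t rest).trans hsuf
    simp only [mpop]
    split
    · rename_i hpop
      have hnsr : j = nsrA g (g t) (t + 1) (n - t) := by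
        apply nsr_unique
        · exact ⟨j - (t + 1), by omega, by rw [show t + 1 + (j - (t + 1)) = j by omega]; exact hpop⟩
        · omega
        · exact hpop
        · intro u hu1 hu2; exact hktmin u (by omega) hu2
      have hnle : mbelow rest = nleA g (g t) t := by
        have hb1 : -1 ≤ mbelow rest := by
          cases rest with
          | nil => simp only [mbelow]; omega
          | cons t' r2 => simp only [mbelow]; omega
        have hb2 : mbelow rest < (t : Int) := by
          cases rest with
          | nil => simp only [mbelow]; omega
          | cons t' r2 =>
            have : t > t' := (List.pairwise_cons.mp hpair).1 t' (by simp)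
            simp only [mbelow]; omega
        have hb3 : mbelow rest = -1 ∨ (0 ≤ mbelow rest ∧ g (mbelow rest).toNat ≤ g t) := by
          cases rest with
          | nil => left; rfl
          | cons t' r2 =>
            right
            have ht' : t' ∈ s0 := hrest.subset (by simp)
            obtain ⟨hk'1, hk'2⟩ := (hmem t').mp ht'
            have hlt : t' < t := (List.pairwise_cons.mp hpair).1 t' (by simp)
            refine ⟨by simp only [mbelow]; omega, ?_⟩
            simp only [mbelow, Int.toNat_natCast]
            exact hk'2 t hlt hktj
        exact nle_unique g (g t) t (mbelow rest) hb1 hb2 hb3 (gap_gt g j s0 hp hmem t rest hsuf)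
      have hrec : g t * ((j : Int) - mbelow rest - 1) = marea g n t := by
        unfold marea
        rw [← hnsr, hnle]
      rw [hrec]
      have hcov : ∀ t2, (Popped g j t2 ∨ (t2 ∈ s0 ∧ t2 ∉ rest ∧ g j < g t2)) →
          marea g n t2 ≤ max ans (marea g n t) := by
        rintro t2 (hP | ⟨hm0, hnm, hgt⟩)
        · exact le_trans (h2 t2 (Or.inl hP)) (le_max_left _ _)
        · by_cases ht2 : t2 = t
          · subst ht2; exact le_max_right _ _
          · have hns : t2 ∉ t :: rest := by simp [ht2, hnm]
            exact le_trans (h2 t2 (Or.inr ⟨hm0, hns, hgt⟩)) (le_max_left _ _)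
      have hatt : max ans (marea g n t) = ans0 ∨
          ∃ t2, (Popped g j t2 ∨ (t2 ∈ s0 ∧ g j < g t2)) ∧ max ans (marea g n t) = marea g n t2 := by
        rcases max_choice ans (marea g n t) with hmx | hmx
        · rw [hmx]; exact h3
        · rw [hmx]; exact Or.inr ⟨t, Or.inr ⟨hts0, hpop⟩, rfl⟩
      obtain ⟨c1, c2, c3, c4, c5⟩ := ih (max ans (marea g n t)) hrest
        (le_trans h1 (le_max_left _ _)) hcov hatt
      refine ⟨c1.trans (List.suffix_cons t rest), ?_, c3, c4, c5⟩
      intro t2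
      rw [c2 t2]
      constructor
      · rintro ⟨hm, hle⟩; exact ⟨List.mem_cons_of_mem _ hm, hle⟩
      · rintro ⟨hm, hle⟩
        rcases List.mem_cons.mp hm with rfl | hm
        · exact absurd hle (not_le.mpr hpop)
        · exact ⟨hm, hle⟩
    · rename_i hnpop
      refine ⟨List.suffix_rfl, ?_, h1, ?_, h3⟩
      · intro t2
        constructor
        · intro hm
          refine ⟨hm, ?_⟩
          rcases List.mem_cons.mp hm with rfl | hm2
          · exact not_lt.mp hnpop
          · have ht2 : t2 ∈ s0 := hrest.subset hm2
            obtain ⟨_, hk2⟩ := (hmem t2).mp ht2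
            have hlt : t2 < t := (List.pairwise_cons.mp hpair).1 t2 hm2
            exact le_trans (hk2 t hlt hktj) (not_lt.mp hnpop)
        · exact fun h => h.1
      · exact h2

lemma mrun_inv (g : Nat → Int) (n : Nat) (ans0 : Int) (hg : ∀ t, 0 ≤ g t) :
    ∀ k, k ≤ n + 1 → SInv g k (mrun g ans0 k).1 ∧ AInv g n ans0 k (mrun g ans0 k).2 := by
  intro k
  induction k with
  | zero =>
    intro _
    have h0 : mrun g ans0 0 = ([], ans0) := by simp [mrun]
    rw [h0]
    refine ⟨⟨List.Pairwise.nil, ?_⟩, le_refl _, ?_, Or.inl rfl⟩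
    · intro t
      constructor
      · intro h; simp at h
      · rintro ⟨h, _⟩; omega
    · rintro t ⟨u, h1, h2, h3⟩; omega
  | succ k ihk =>
    intro hk1
    have hkn : k ≤ n := by omega
    obtain ⟨hS, hA⟩ := ihk (by omega)
    obtain ⟨hpair, hmem⟩ := hS
    obtain ⟨hA1, hA2, hA3⟩ := hA
    have hrun : mrun g ans0 (k + 1) = mstep g (mrun g ans0 k) k := by
      simp [mrun, List.range_succ]
    have h2' : ∀ t, (Popped g k t ∨ (t ∈ (mrun g ans0 k).1 ∧ t ∉ (mrun g ans0 k).1 ∧ g k < g t)) →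
        marea g n t ≤ (mrun g ans0 k).2 := by
      rintro t (hP | ⟨hm, hnm, _⟩)
      · exact hA2 t hP
      · exact absurd hm hnm
    have h3' : (mrun g ans0 k).2 = ans0 ∨ ∃ t, (Popped g k t ∨ (t ∈ (mrun g ans0 k).1 ∧ g k < g t)) ∧
        (mrun g ans0 k).2 = marea g n t := by
      rcases hA3 with h | ⟨t, hP, he⟩
      · exact Or.inl h
      · exact Or.inr ⟨t, Or.inl hP, he⟩
    obtain ⟨c1, c2, c3, c4, c5⟩ := mpop_inv g n k ans0 hg hkn _ hpair hmem _ _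
      List.suffix_rfl hA1 h2' h3'
    rw [hrun]
    simp only [mstep, SInv, AInv]
    refine ⟨⟨?_, ?_⟩, c3, ?_, ?_⟩
    · rw [List.pairwise_cons]
      refine ⟨?_, hpair.sublist c1.sublist⟩
      intro t ht
      have hm0 : t ∈ (mrun g ans0 k).1 := ((c2 t).mp ht).1
      exact ((hmem t).mp hm0).1
    · intro t
      simp only [List.mem_cons]
      constructor
      · rintro (rfl | hm)
        · exact ⟨by omega, fun u hu1 hu2 => by omega⟩
        · obtain ⟨hm0, hle⟩ := (c2 t).mp hm
          obtain ⟨hlt, hmin⟩ := (hmem t).mp hm0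
          refine ⟨by omega, ?_⟩
          intro u hu1 hu2
          rcases Nat.lt_succ_iff_lt_or_eq.mp hu2 with h | rfl
          · exact hmin u hu1 h
          · exact hle
      · rintro ⟨hlt, hmin⟩
        by_cases he : t = k
        · exact Or.inl he
        · right
          have hltk : t < k := by omega
          have hm0 : t ∈ (mrun g ans0 k).1 :=
            (hmem t).mpr ⟨hltk, fun u hu1 hu2 => hmin u hu1 (by omega)⟩
          exact (c2 t).mpr ⟨hm0, hmin k hltk (by omega)⟩
    · rintro t ⟨u, hu1, hu2, hu3⟩
      by_cases hP : Popped g k t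
      · exact c4 t (Or.inl hP)
      · have hu : u = k := by
          rcases Nat.lt_succ_iff_lt_or_eq.mp hu2 with h | h
          · exact absurd ⟨u, hu1, h, hu3⟩ hP
          · exact h
        rw [hu] at hu1 hu3
        have hkeep : Keep g k t := by
          refine ⟨hu1, ?_⟩
          intro v hv1 hv2
          by_contra hc
          exact hP ⟨v, hv1, hv2, by omega⟩
        have hm0 : t ∈ (mrun g ans0 k).1 := (hmem t).mpr hkeep
        have hnm : t ∉ (mpop g (g k) k (mrun g ans0 k).1 (mrun g ans0 k).2).1 := by
          intro hc
          have := ((c2 t).mp hc).2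
          omega
        exact c4 t (Or.inr ⟨hm0, hnm, hu3⟩)
    · rcases c5 with h | ⟨t, hP, he⟩
      · exact Or.inl h
      · refine Or.inr ⟨t, ?_, he⟩
        rcases hP with hP | ⟨hm0, hgt⟩
        · obtain ⟨u, hu1, hu2, hu3⟩ := hP
          exact ⟨u, hu1, by omega, hu3⟩
        · have hk0 := (hmem t).mp hm0
          exact ⟨k, hk0.1, by omega, hgt⟩

lemma popped_iff (g : Nat → Int) (n : Nat) (hg : ∀ t, 0 ≤ g t) (hgn : g n = 0) (t : Nat) :
    Popped g (n + 1) t ↔ (t < n ∧ 0 < g t) := by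
  constructor
  · rintro ⟨u, h1, h2, h3⟩
    have := hg u
    exact ⟨by omega, by omega⟩
  · rintro ⟨h1, h2⟩
    exact ⟨n, h1, by omega, by rw [hgn]; omega⟩

lemma best_char (g : Nat → Int) (n : Nat) :
    ∀ (l : List Nat) (a0 : Int),
      a0 ≤ l.foldl (fun ans t => if 0 < g t then (if marea g n t > ans then marea g n t else ans) else ans) a0 ∧
      (∀ t ∈ l, 0 < g t → marea g n t ≤ l.foldl (fun ans t => if 0 < g t then (if marea g n t > ans then marea g n t else ans) else ans) a0) ∧
      (l.foldl (fun ans t => if 0 < g t then (if marea g n t > ans then marea g n t else ans) else ans) a0 = a0 ∨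
        ∃ t ∈ l, 0 < g t ∧ l.foldl (fun ans t => if 0 < g t then (if marea g n t > ans then marea g n t else ans) else ans) a0 = marea g n t) := by
  intro l
  induction l with
  | nil => intro a0; exact ⟨le_refl _, by simp, Or.inl rfl⟩
  | cons t l ih =>
    intro a0
    simp only [List.foldl_cons]
    set a1 := if 0 < g t then (if marea g n t > a0 then marea g n t else a0) else a0 with ha1
    obtain ⟨i1, i2, i3⟩ := ih a1
    have h01 : a0 ≤ a1 := by rw [ha1]; split_ifs <;> omega
    refine ⟨le_trans h01 i1, ?_, ?_⟩
    · intro u hu hgu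
      rcases List.mem_cons.mp hu with rfl | hu
      · refine le_trans ?_ i1
        rw [ha1]
        split_ifs <;> omega
      · exact i2 u hu hgu
    · rcases i3 with h | ⟨u, hu, hgu, he⟩
      · rw [h, ha1]
        split_ifs with hc1 hc2
        · exact Or.inr ⟨t, by simp, hc1, rfl⟩
        · exact Or.inl rfl
        · exact Or.inl rfl
      · exact Or.inr ⟨u, List.mem_cons_of_mem _ hu, hgu, he⟩

lemma mrun_eq_best (g : Nat → Int) (n : Nat) (ans0 : Int) (hg : ∀ t, 0 ≤ g t) (hgn : g n = 0) :
    (mrun g ans0 (n + 1)).2 =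
      (List.range n).foldl (fun ans t => if 0 < g t then (if marea g n t > ans then marea g n t else ans) else ans) ans0 := by
  obtain ⟨hS, hA⟩ := mrun_inv g n ans0 hg (n + 1) (le_refl _)
  obtain ⟨hA1, hA2, hA3⟩ := hA
  obtain ⟨b1, b2, b3⟩ := best_char g n (List.range n) ans0
  apply le_antisymm
  · rcases hA3 with h | ⟨t, hP, he⟩
    · rw [h]; exact b1
    · rw [he]
      obtain ⟨h1, h2⟩ := (popped_iff g n hg hgn t).mp hP
      exact b2 t (List.mem_range.mpr h1) h2
  · rcases b3 with h | ⟨t, ht, hgt, he⟩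
    · rw [h]; exact hA1
    · rw [he]
      exact hA2 t ((popped_iff g n hg hgn t).mpr ⟨List.mem_range.mp ht, hgt⟩)

-- ---- bridging the ports to the model ----
def gof (row : List Int) (c : Int) (h : List Int) : Nat → Int :=
  fun t => PySem.List.pyGetD (heightsB row c h) (t : Int) 0

lemma pyGetD_zero_nonneg (h : List Int) (hpos : ∀ x ∈ h, 0 ≤ x) (i : Int) :
    0 ≤ PySem.List.pyGetD h i 0 := by
  by_cases hr : PySem.Raise.InRange h.length i
  · exact hpos _ (PySem.List.pyGetD_mem h 0 hr)
  · have hn : PySem.List.pyGet? h i = none := (PySem.List.pyGet?_eq_none_iff h i).mpr hr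
    simp [PySem.List.pyGetD, hn]

lemma scanL_eq (H : List Int) (ht : Int) :
    ∀ k : Nat, scanL H ht ((k : Int) - 1) = nleA (fun t => PySem.List.pyGetD H (t : Int) 0) ht k := by
  intro k
  induction k with
  | zero =>
    rw [scanL]
    rw [dif_neg (by norm_num)]
    simp [nleA]
  | succ k ih =>
    have hc : ((k + 1 : Nat) : Int) - 1 = (k : Int) := by push_cast; ring
    rw [hc, scanL]
    by_cases hgt : PySem.List.pyGetD H (k : Int) 0 > ht
    · rw [dif_pos ⟨Int.natCast_nonneg k, hgt⟩, ih]
      simp only [nleA]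
      rw [if_neg (by simpa using not_le.mpr hgt)]
    · rw [dif_neg (by rintro ⟨_, h⟩; exact hgt h)]
      simp only [nleA]
      rw [if_pos (by simpa using not_lt.mp hgt)]

lemma scanR_eq (H : List Int) (ht : Int) (n : Nat) (hlen : H.length = n + 1) :
    ∀ q : Nat, (∃ u, q ≤ u ∧ u ≤ n ∧ PySem.List.pyGetD H (u : Int) 0 < ht) →
      scanR H ht (q : Int) = ((nsrA (fun t => PySem.List.pyGetD H (t : Int) 0) ht q (n + 1 - q) : Nat) : Int) := by
  suffices hgen : ∀ (f q : Nat), f = n + 1 - q →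
      (∃ u, q ≤ u ∧ u ≤ n ∧ PySem.List.pyGetD H (u : Int) 0 < ht) →
      scanR H ht (q : Int) = ((nsrA (fun t => PySem.List.pyGetD H (t : Int) 0) ht q f : Nat) : Int) by
    intro q hex
    exact hgen (n + 1 - q) q rfl hex
  intro f
  induction f with
  | zero =>
    intro q hq hex
    obtain ⟨u, h1, h2, _⟩ := hex
    omega
  | succ f ih =>
    intro q hq hex
    have hqn : q ≤ n := by obtain ⟨u, h1, h2, _⟩ := hex; omega
    rw [scanR]
    by_cases hge : PySem.List.pyGetD H (q : Int) 0 ≥ ht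
    · have hex' : ∃ u, q + 1 ≤ u ∧ u ≤ n ∧ PySem.List.pyGetD H (u : Int) 0 < ht := by
        obtain ⟨u, h1, h2, h3⟩ := hex
        refine ⟨u, ?_, h2, h3⟩
        rcases Nat.eq_or_lt_of_le h1 with rfl | h
        · exact absurd h3 (not_lt.mpr hge)
        · omega
      have hcast : (q : Int) + 1 = ((q + 1 : Nat) : Int) := by push_cast; ring
      rw [dif_pos ⟨Int.natCast_nonneg q, by rw [hlen]; push_cast; omega, hge⟩, hcast,
        ih (q + 1) (by omega) hex']
      simp only [nsrA]
      rw [if_neg (by simpa using not_lt.mpr hge)]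
    · rw [dif_neg (by rintro ⟨_, _, h⟩; exact hge h)]
      simp only [nsrA]
      rw [if_pos (by simpa using not_le.mp hge)]

lemma heightsB_len (row : List Int) (n : Nat) (h : List Int) :
    (heightsB row (n : Int) h).length = n + 1 := by
  unfold heightsB
  rw [List.length_map, PySem.List.length_pyRange_one]
  omega

lemma heightsB_get (row : List Int) (n : Nat) (h : List Int) (k : Nat) (hk : k < n + 1) :
    PySem.List.pyGetD (heightsB row (n : Int) h) (k : Int) 0 =
      (if (k : Int) == (n : Int) || PySem.List.pyGetD row (k : Int) 0 == 1 then 0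
       else PySem.List.pyGetD h (k : Int) 0 + 1) := by
  unfold heightsB
  have hb : ((n : Int) + 1) = ((n + 1 : Nat) : Int) := by push_cast; ring
  rw [hb, PySem.List.pyGetD_map_pyRange _ (n + 1) k 0 hk]

lemma heightsB_nonneg (row : List Int) (n : Nat) (h : List Int) (hpos : ∀ x ∈ h, 0 ≤ x) :
    ∀ t : Nat, 0 ≤ PySem.List.pyGetD (heightsB row (n : Int) h) (t : Int) 0 := by
  intro t
  by_cases ht : t < n + 1
  · rw [heightsB_get row n h t ht]
    split
    · omega
    · have := pyGetD_zero_nonneg h hpos (t : Int)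
      omega
  · have hlen := heightsB_len row n h
    rw [PySem.List.pyGetD_natCast, List.getD_eq_default]
    rw [hlen]
    omega

lemma heightsB_last (row : List Int) (n : Nat) (h : List Int) :
    PySem.List.pyGetD (heightsB row (n : Int) h) (n : Int) 0 = 0 := by
  rw [heightsB_get row n h n (by omega)]
  simp

-- ---- small list-index helpers for the simulation ----
lemma getD_take_append_drop (H h0 : List Int) (k t : Nat) (hk : k ≤ H.length) (ht : t < k) :
    (H.take k ++ h0.drop k).getD t 0 = H.getD t 0 := by
  have hlen : (H.take k).length = k := by simp; omega
  rw [List.getD_eq_getElem?_getD, List.getElem?_append_left (by omega), List.getElem?_take_of_lt ht,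
    ← List.getD_eq_getElem?_getD]

lemma getD_skip_prefix (H h0 : List Int) (k : Nat) (hk : k ≤ H.length) (hk0 : k < h0.length) :
    (H.take k ++ h0.drop k).getD k 0 = h0.getD k 0 := by
  have hlen : (H.take k).length = k := by simp; omega
  rw [List.getD_eq_getElem?_getD, List.getElem?_append_right (by omega), hlen, Nat.sub_self,
    List.getElem?_drop, Nat.add_zero, ← List.getD_eq_getElem?_getD]

lemma set_mid (H h0 : List Int) (k : Nat) (hk : k < H.length) (hk0 : k < h0.length) :
    (H.take k ++ h0.drop k).set k (H.getD k 0) = H.take (k + 1) ++ h0.drop (k + 1) := by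
  have hlen : (H.take k).length = k := by simp; omega
  rw [List.drop_eq_getElem_cons hk0, List.set_append, if_neg (by omega), hlen, Nat.sub_self,
    List.set_cons_zero, List.getD_eq_getElem _ _ hk, List.take_add_one, List.getElem?_eq_getElem hk,
    Option.toList_some, List.append_assoc, List.singleton_append]

lemma popA_sim (h' : List Int) (g : Nat → Int) (j : Nat)
    (hread : ∀ t : Nat, t < j → PySem.List.pyGetD h' (t : Int) 0 = g t) :
    ∀ (ms : List Nat) (ans : Int), (∀ t ∈ ms, t < j) →
      popA h' (g j) (j : Int) (ms.map (fun (t : Nat) => (t : Int)) ++ [-1]) ans =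
        ((mpop g (g j) j ms ans).1.map (fun (t : Nat) => (t : Int)) ++ [-1], (mpop g (g j) j ms ans).2) := by
  intro ms
  induction ms with
  | nil =>
    intro ans _
    simp [popA, mpop]
  | cons t rest ih =>
    intro ans hlt
    have htj : t < j := hlt t (by simp)
    have hrest : ∀ u ∈ rest, u < j := fun u hu => hlt u (by simp [hu])
    have hmpop1 : mpop g (g j) j (t :: rest) ans =
        if g j < g t then mpop g (g j) j rest (max ans (g t * ((j : Int) - mbelow rest - 1)))
        else (t :: rest, ans) := rfl
    have hpopA1 : popA h' (g j) (j : Int) ((t : Int) :: (rest.map (fun (t : Nat) => (t : Int)) ++ [-1])) ans =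
        if PySem.List.pyGetD h' (t : Int) 0 > g j then
          popA h' (g j) (j : Int) (rest.map (fun (t : Nat) => (t : Int)) ++ [-1])
            (max ans (PySem.List.pyGetD h' (t : Int) 0 * ((j : Int) - mbelow rest - 1)))
        else ((t : Int) :: (rest.map (fun (t : Nat) => (t : Int)) ++ [-1]), ans) := by
      cases rest with
      | nil => rfl
      | cons t2 r2 => rfl
    simp only [List.map_cons, List.cons_append]
    rw [hpopA1, hmpop1, hread t htj]
    by_cases hc : g j < g t
    · rw [if_pos (show g t > g j from hc), if_pos hc, ih _ hrest]
    · rw [if_neg (show ¬ g t > g j from hc), if_neg hc]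
      simp

lemma rowA_sim (row h0 : List Int) (n : Nat) (hlen : h0.length = n + 1) (hpos : ∀ x ∈ h0, 0 ≤ x)
    (ans : Int) :
    ∀ k, k ≤ n + 1 →
      (List.range k).foldl (fun st (t : Nat) => stepA row (n : Int) st (t : Int)) (h0, [-1], ans) =
        ((heightsB row (n : Int) h0).take k ++ h0.drop k,
         (mrun (gof row (n : Int) h0) ans k).1.map (fun (t : Nat) => (t : Int)) ++ [-1],
         (mrun (gof row (n : Int) h0) ans k).2) := by
  intro k
  induction k with
  | zero => intro _; simp [mrun]
  | succ k ih =>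
    intro hk1
    have hk : k ≤ n := by omega
    have hkn1 : k < n + 1 := by omega
    have HL : (heightsB row (n : Int) h0).length = n + 1 := heightsB_len row n h0
    have hgnn : ∀ t, 0 ≤ gof row (n : Int) h0 t := fun t => heightsB_nonneg row n h0 hpos t
    obtain ⟨⟨hpair, hmem⟩, _⟩ := mrun_inv (gof row (n : Int) h0) n ans hgnn k (by omega)
    have hentries : ∀ t ∈ (mrun (gof row (n : Int) h0) ans k).1, t < k :=
      fun t ht => ((hmem t).mp ht).1
    have hmrun : mrun (gof row (n : Int) h0) ans (k + 1) =
        mstep (gof row (n : Int) h0) (mrun (gof row (n : Int) h0) ans k) k := by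
      simp [mrun, List.range_succ]
    rw [List.range_succ, List.foldl_append, List.foldl_cons, List.foldl_nil, ih (by omega), hmrun]
    simp only [stepA]
    have hxread : PySem.List.pyGetD ((heightsB row (n : Int) h0).take k ++ h0.drop k) (k : Int) 0 =
        PySem.List.pyGetD h0 (k : Int) 0 := by
      rw [PySem.List.pyGetD_natCast, PySem.List.pyGetD_natCast]
      exact getD_skip_prefix _ _ k (by omega) (by omega)
    have hx : (if ((k : Int) == (n : Int) || PySem.List.pyGetD row (k : Int) 0 == 1 : Bool) then (0 : Int)
        else PySem.List.pyGetD ((heightsB row (n : Int) h0).take k ++ h0.drop k) (k : Int) 0 + 1) =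
        gof row (n : Int) h0 k := by
      rw [hxread]
      exact (heightsB_get row n h0 k hkn1).symm
    rw [hx]
    have hset : PySem.List.pySetD ((heightsB row (n : Int) h0).take k ++ h0.drop k) (k : Int)
        (gof row (n : Int) h0 k) = (heightsB row (n : Int) h0).take (k + 1) ++ h0.drop (k + 1) := by
      rw [PySem.List.pySetD_natCast]
      have hgd : gof row (n : Int) h0 k = (heightsB row (n : Int) h0).getD k 0 := by
        simp [gof]
      rw [hgd]
      exact set_mid _ h0 k (by omega) (by omega)
    rw [hset]
    have hread' : ∀ t : Nat, t < k → PySem.List.pyGetD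
        ((heightsB row (n : Int) h0).take (k + 1) ++ h0.drop (k + 1)) (t : Int) 0 =
        gof row (n : Int) h0 t := by
      intro t htk
      rw [PySem.List.pyGetD_natCast, getD_take_append_drop _ h0 (k + 1) t (by omega) (by omega)]
      simp [gof]
    rw [popA_sim _ (gof row (n : Int) h0) k hread' _ _ hentries]
    simp only [mstep, List.map_cons, List.cons_append]

lemma rowB_step (row h0 : List Int) (n : Nat) (t : Nat) (ht : t < n) (b : Int) :
    (let ht' := PySem.List.pyGetD (heightsB row (n : Int) h0) (t : Int) 0
     if ht' > 0 then
       let p := scanL (heightsB row (n : Int) h0) ht' ((t : Int) - 1)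
       let q := scanR (heightsB row (n : Int) h0) ht' ((t : Int) + 1)
       let area := ht' * (q - p - 1)
       if area > b then area else b
     else b) =
    (if 0 < gof row (n : Int) h0 t then
       (if marea (gof row (n : Int) h0) n t > b then marea (gof row (n : Int) h0) n t else b)
     else b) := by
  dsimp only
  have hgof : PySem.List.pyGetD (heightsB row (n : Int) h0) (t : Int) 0 = gof row (n : Int) h0 t := rfl
  rw [hgof]
  by_cases hp : 0 < gof row (n : Int) h0 t
  · rw [if_pos (show gof row (n : Int) h0 t > 0 from hp), if_pos hp]
    have hL := scanL_eq (heightsB row (n : Int) h0) (gof row (n : Int) h0 t) t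
    have hcast : (t : Int) + 1 = ((t + 1 : Nat) : Int) := by push_cast; ring
    have hR := scanR_eq (heightsB row (n : Int) h0) (gof row (n : Int) h0 t) n (heightsB_len row n h0)
      (t + 1) ⟨n, by omega, le_refl n, by rw [heightsB_last row n h0]; exact hp⟩
    rw [hL, hcast, hR]
    have hfuel : n + 1 - (t + 1) = n - t := by omega
    rw [hfuel]
    unfold marea gof
    rfl
  · rw [if_neg (show ¬ gof row (n : Int) h0 t > 0 from hp), if_neg hp]

lemma rowB_eq (row h0 : List Int) (n : Nat) (hpos : ∀ x ∈ h0, 0 ≤ x) (ans : Int) :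
    (PySem.List.pyRange 0 (n : Int) 1).foldl (fun ans t =>
        let ht := PySem.List.pyGetD (heightsB row (n : Int) h0) t 0
        if ht > 0 then
          let p := scanL (heightsB row (n : Int) h0) ht (t - 1)
          let q := scanR (heightsB row (n : Int) h0) ht (t + 1)
          let area := ht * (q - p - 1)
          if area > ans then area else ans
        else ans) ans =
      (List.range n).foldl (fun ans t =>
        if 0 < gof row (n : Int) h0 t then
          (if marea (gof row (n : Int) h0) n t > ans then marea (gof row (n : Int) h0) n t else ans)
        else ans) ans := by
  rw [PySem.List.pyRange_zero_natCast n, List.foldl_map]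
  suffices h : ∀ (l : List Nat), (∀ t ∈ l, t < n) → ∀ (b : Int),
      l.foldl (fun b (t : Nat) =>
        let ht := PySem.List.pyGetD (heightsB row (n : Int) h0) ((t : Nat) : Int) 0
        if ht > 0 then
          let p := scanL (heightsB row (n : Int) h0) ht (((t : Nat) : Int) - 1)
          let q := scanR (heightsB row (n : Int) h0) ht (((t : Nat) : Int) + 1)
          let area := ht * (q - p - 1)
          if area > b then area else b
        else b) b =
      l.foldl (fun b t =>
        if 0 < gof row (n : Int) h0 t then
          (if marea (gof row (n : Int) h0) n t > b then marea (gof row (n : Int) h0) n t else b)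
        else b) b by
    exact h (List.range n) (fun t htl => List.mem_range.mp htl) ans
  intro l hl
  induction l with
  | nil => intro b; rfl
  | cons t l ihl =>
    intro b
    simp only [List.foldl_cons]
    rw [rowB_step row h0 n t (hl t (by simp)) b, ihl (fun u hu => hl u (by simp [hu]))]

lemma heightsB_mem_nonneg (row h : List Int) (n : Nat) (hpos : ∀ x ∈ h, 0 ≤ x) :
    ∀ x ∈ heightsB row (n : Int) h, 0 ≤ x := by
  intro x hx
  obtain ⟨t, htlen, rfl⟩ := List.mem_iff_getElem.mp hx
  have hnn := heightsB_nonneg row n h hpos t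
  rwa [PySem.List.pyGetD_natCast, List.getD_eq_getElem _ _ htlen] at hnn

lemma outer_sim (a : List (List Int)) (n : Nat) :
    ∀ (L : List Int) (h : List Int) (ans : Int), h.length = n + 1 → (∀ x ∈ h, 0 ≤ x) →
      (L.foldl (fun (st : List Int × Int) i =>
        let row := PySem.List.pyGetD a i []
        let r := (PySem.List.pyRange 0 ((n : Int) + 1) 1).foldl (stepA row (n : Int)) (st.1, [-1], st.2)
        (r.1, r.2.2)) (h, ans)).2 =
      (L.foldl (fun (st : List Int × Int) i =>
        let row := PySem.List.pyGetD a i []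
        let hh := heightsB row (n : Int) st.1
        let ans := (PySem.List.pyRange 0 (n : Int) 1).foldl (fun ans t =>
          let ht := PySem.List.pyGetD hh t 0
          if ht > 0 then
            let p := scanL hh ht (t - 1)
            let q := scanR hh ht (t + 1)
            let area := ht * (q - p - 1)
            if area > ans then area else ans
          else ans) st.2
        (hh, ans)) (h, ans)).2 := by
  intro L
  induction L with
  | nil => intro h ans _ _; rfl
  | cons i L ihL =>
    intro h ans hlen hpos
    simp only [List.foldl_cons]
    have hpr : PySem.List.pyRange 0 ((n : Int) + 1) 1 =
        (List.range (n + 1)).map (fun (k : Nat) => (k : Int)) := by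
      have hc : ((n : Int) + 1) = ((n + 1 : Nat) : Int) := by push_cast; ring
      rw [hc, PySem.List.pyRange_zero_natCast]
    have hrowA := rowA_sim (PySem.List.pyGetD a i []) h n hlen hpos ans (n + 1) (le_refl _)
    have hAstep : (PySem.List.pyRange 0 ((n : Int) + 1) 1).foldl
        (stepA (PySem.List.pyGetD a i []) (n : Int)) (h, [-1], ans) =
        (heightsB (PySem.List.pyGetD a i []) (n : Int) h,
         (mrun (gof (PySem.List.pyGetD a i []) (n : Int) h) ans (n + 1)).1.map
           (fun (t : Nat) => (t : Int)) ++ [-1],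
         (mrun (gof (PySem.List.pyGetD a i []) (n : Int) h) ans (n + 1)).2) := by
      rw [hpr]
      simp only [List.foldl_map]
      rw [hrowA, List.take_of_length_le (le_of_eq (heightsB_len (PySem.List.pyGetD a i []) n h)),
        List.drop_eq_nil_of_le (le_of_eq hlen), List.append_nil]
    have hg0 : ∀ t, 0 ≤ gof (PySem.List.pyGetD a i []) (n : Int) h t :=
      fun t => heightsB_nonneg (PySem.List.pyGetD a i []) n h hpos t
    have hgl : gof (PySem.List.pyGetD a i []) (n : Int) h n = 0 :=
      heightsB_last (PySem.List.pyGetD a i []) n h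
    have hmod := (mrun_eq_best (gof (PySem.List.pyGetD a i []) (n : Int) h) n ans hg0 hgl).trans
      (rowB_eq (PySem.List.pyGetD a i []) h n hpos ans).symm
    rw [hAstep]
    rw [hmod]
    exact ihL (heightsB (PySem.List.pyGetD a i []) (n : Int) h) _
      (heightsB_len (PySem.List.pyGetD a i []) n h)
      (heightsB_mem_nonneg (PySem.List.pyGetD a i []) h n hpos)

lemma ports_eq (a : List (List Int)) : maxs a = maxs_alt a := by
  simp only [maxs, maxs_alt]
  have hinit : (PySem.List.pyRange 0 ((((PySem.List.pyGetD a 0 []).length : Int)) + 1) 1).map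
      (fun _ => (0 : Int)) =
      List.replicate ((((PySem.List.pyGetD a 0 []).length : Int)) + 1).toNat 0 := by
    rw [List.map_const']
    congr 1
    rw [PySem.List.length_pyRange_one]
    omega
  rw [hinit]
  exact outer_sim a (PySem.List.pyGetD a 0 []).length (PySem.List.pyRange 0 (a.length : Int) 1)
    (List.replicate ((((PySem.List.pyGetD a 0 []).length : Int)) + 1).toNat 0) 0
    (by simp)
    (by intro x hx; simp [List.eq_of_mem_replicate hx])

-- ===== VERDICT (by name: the statement is the Claim_ definition above) =====
theorem maxs_spec : Claim_equal_maxs := by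
  intro a _ _
  unfold Spec_maxs
  exact ports_eq a
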